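-- pv_equiv track=rewrite | github.com/psarangi550/Interview_Solve_cases | recursive_in_depth/sub_str_recursive.py | func
-- ===== SOURCE A (Python) =====
-- def func(str1,str2):
--
--     if len(str1)==0:
--         return False
--     if len(str2)==0:
--         return True
--     if str1[0]==str2[0]:
--         return CheckMatch(str1,str2)
--     return func(str1[1:],str2)
--
-- def CheckMatch(str1,str2):
--     if len(str1)==0:
--         return False
--     if len(str2)==0:
--         return True
--     if str1[0]==str2[0]:
--         return CheckMatch(str1[1:],str2[1:])
--     else:
--         return False
-- ===== SOURCE B (Python) =====
-- def func(str1, str2):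
--     # A commits to the first index whose char equals str2[0] and accepts only a
--     # proper-length prefix match there (a char of str1 must remain after the match).
--     if len(str1) == 0:
--         return False
--     if len(str2) == 0:
--         return True
--     for i in range(len(str1)):
--         if str1[i] == str2[0]:
--             for j in range(len(str2)):
--                 if i + j >= len(str1) or str1[i + j] != str2[j]:
--                     return False
--             return i + len(str2) < len(str1)
--     return False
-- ===== Notes on version B (the rewrite author's own statement) =====
-- stated objective: alternative
-- what changed: Replaces A's two mutually slicing recursive functions with a single iterative function: an indexed outer scan for the first occurrence of str2[0] and a bounded indexed inner comparison loop plus a length test, with no slicing and no recursion.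
import Mathlib
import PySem

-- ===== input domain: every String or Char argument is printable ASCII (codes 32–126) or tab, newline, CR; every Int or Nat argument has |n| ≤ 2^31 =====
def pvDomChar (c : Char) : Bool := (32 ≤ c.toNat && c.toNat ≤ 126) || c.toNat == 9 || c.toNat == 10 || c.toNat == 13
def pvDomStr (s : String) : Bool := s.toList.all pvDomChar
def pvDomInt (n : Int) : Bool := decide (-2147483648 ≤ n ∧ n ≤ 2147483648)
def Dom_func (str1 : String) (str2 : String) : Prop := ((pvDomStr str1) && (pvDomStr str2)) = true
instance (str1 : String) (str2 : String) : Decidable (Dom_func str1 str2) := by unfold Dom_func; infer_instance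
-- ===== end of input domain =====

-- B replaces A's two mutually slicing recursive functions with one iterative function:
-- an indexed scan for the first occurrence of str2[0], a bounded indexed comparison loop
-- and a length test (alternative decomposition, no slicing, no recursion).


-- ===== PORT A =====
-- CheckMatch: branch order as in Python (empty str1 checked before empty str2)
def checkMatchA : List Char → List Char → Bool
  | [], _ => false
  | _ :: _, [] => true
  | a :: t1, b :: t2 => if a = b then checkMatchA t1 t2 else false

def funcA : List Char → List Char → Bool
  | [], _ => false
  | _ :: _, [] => true
  | a :: t1, b :: t2 => if a = b then checkMatchA (a :: t1) (b :: t2) else funcA t1 (b :: t2)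

def func (str1 : String) (str2 : String) : Bool := funcA str1.toList str2.toList

-- ===== PORT B =====
-- inner loop 'for j in range(len(str2))': structural recursion on the index list;
-- returning false stops the loop, exhausting the indices falls through to the length test
def bInner (s1 s2 : List Char) (i : Nat) : List Nat → Bool
  | [] => true
  | j :: js =>
    if s1.length ≤ i + j then false
    else if s1.getD (i + j) ' ' ≠ s2.getD j ' ' then false
    else bInner s1 s2 i js

-- outer loop 'for i in range(len(str1))': the first index whose char equals str2[0] commits;
-- after the inner loop succeeds, 'return i + len(str2) < len(str1)'
def bOuter (s1 s2 : List Char) : List Nat → Bool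
  | [] => false
  | i :: is =>
    if s1.getD i ' ' = s2.getD 0 ' ' then
      bInner s1 s2 i (List.range s2.length) && decide (i + s2.length < s1.length)
    else bOuter s1 s2 is

def func_alt (str1 : String) (str2 : String) : Bool :=
  let s1 := str1.toList
  let s2 := str2.toList
  if s1.length = 0 then false
  else if s2.length = 0 then true
  else bOuter s1 s2 (List.range s1.length)

-- ===== PRECONDITION & SPEC =====
def Spec_func (str1 : String) (str2 : String) (out : Bool) : Prop := out = func_alt str1 str2
instance (str1 : String) (str2 : String) (out : Bool) : Decidable (Spec_func str1 str2 out) := by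
  unfold Spec_func; infer_instance

-- ===== CLAIM =====
def Claim_equal_func : Prop :=
  ∀ (str1 : String) (str2 : String), Dom_func str1 str2 → Spec_func str1 str2 (func str1 str2)

-- ===== LEMMAS AND PROOFS =====

-- checkMatchA decides "s2 is a proper-length prefix of s1"
theorem cm_eq (s1 s2 : List Char) :
    checkMatchA s1 s2 = (s2.isPrefixOf s1 && decide (s2.length < s1.length)) := by
  induction s1 generalizing s2 with
  | nil => cases s2 <;> simp [checkMatchA, List.isPrefixOf]
  | cons a t ih =>
    cases s2 with
    | nil => simp [checkMatchA, List.isPrefixOf]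
    | cons b u =>
      by_cases h : a = b
      · subst h
        simp [checkMatchA, List.isPrefixOf, ih]
      · have hba : ((b :: u).isPrefixOf (a :: t)) = false := by
          rw [Bool.eq_false_iff]
          intro hp
          exact h ((List.cons_prefix_cons.mp (List.isPrefixOf_iff_prefix.mp hp)).1).symm
        simp [checkMatchA, h, hba]

theorem bInner_eq (s1 s2 : List Char) (i : Nat) :
    ∀ (k j : Nat), j + k = s2.length →
      bInner s1 s2 i (List.range' j k) = (s2.drop j).isPrefixOf (s1.drop (i + j)) := by
  intro k
  induction k with
  | zero =>
    intro j hj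
    simp at hj
    simp [bInner, hj, List.drop_eq_nil_of_le]
  | succ k ih =>
    intro j hj
    have hjlt : j < s2.length := by omega
    have hs2 : s2.drop j = s2[j] :: s2.drop (j + 1) := (List.getElem_cons_drop hjlt).symm
    rw [List.range'_succ, bInner]
    rw [List.getD_eq_getElem s2 ' ' hjlt]
    split
    · rename_i h1
      have h0 : s1.drop (i + j) = [] := List.drop_eq_nil_of_le h1
      rw [h0, hs2]
      rfl
    · rename_i h1
      push Not at h1
      have hs1 : s1.drop (i + j) = s1[i + j] :: s1.drop (i + j + 1) :=
        (List.getElem_cons_drop h1).symm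
      rw [List.getD_eq_getElem s1 ' ' h1, hs1, hs2, List.isPrefixOf_cons₂]
      split
      · rename_i hne
        have : (s2[j] == s1[i + j]) = false := by
          simp only [beq_eq_false_iff_ne]
          exact fun he => hne he.symm
        simp [this]
      · rename_i he
        push Not at he
        rw [ih (j + 1) (by omega)]
        simp [he, Nat.add_assoc]

-- abstract form of B's outer search, for the induction
def auxSearch : List Char → List Char → Bool
  | [], _ => false
  | a :: t, s2 =>
    if a = s2.headD ' ' then s2.isPrefixOf (a :: t) && decide (s2.length < (a :: t).length)
    else auxSearch t s2

theorem bOuter_eq (s1 s2 : List Char) :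
    ∀ (k i : Nat), i + k = s1.length →
      bOuter s1 s2 (List.range' i k) = auxSearch (s1.drop i) s2 := by
  intro k
  induction k with
  | zero =>
    intro i hi
    simp at hi
    simp [bOuter, hi, List.drop_eq_nil_of_le, auxSearch]
  | succ k ih =>
    intro i hi
    have hilt : i < s1.length := by omega
    have hs1 : s1.drop i = s1[i] :: s1.drop (i + 1) := (List.getElem_cons_drop hilt).symm
    have hh : s2.getD 0 ' ' = s2.headD ' ' := by cases s2 <;> rfl
    have hd : decide (i + s2.length < s1.length)
        = decide (s2.length < (s1[i] :: s1.drop (i + 1)).length) := by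
      apply decide_eq_decide.mpr
      rw [← hs1, List.length_drop]
      omega
    rw [List.range'_succ, bOuter, List.getD_eq_getElem s1 ' ' hilt, hh,
      List.range_eq_range', bInner_eq s1 s2 i s2.length 0 (by omega)]
    simp only [Nat.add_zero, List.drop_zero]
    rw [ih (i + 1) (by omega), hd, hs1, auxSearch]

-- A's search equals B's search, index by index
theorem main_list (s1 : List Char) (b : Char) (u : List Char) :
    funcA s1 (b :: u) = auxSearch s1 (b :: u) := by
  induction s1 with
  | nil => simp [funcA, auxSearch]
  | cons a t ih =>
    by_cases hab : a = b
    · subst hab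
      rw [funcA, auxSearch, cm_eq]
      simp
    · rw [funcA, auxSearch]
      simp [hab, ih]

-- ===== VERDICT =====
theorem func_spec : Claim_equal_func := by
  intro str1 str2 _
  unfold Spec_func func func_alt
  cases h1 : str1.toList with
  | nil => simp [funcA]
  | cons a t =>
    cases h2 : str2.toList with
    | nil => simp [funcA]
    | cons b u =>
      simp only [List.length_cons]
      rw [if_neg (by simp), if_neg (by simp), List.range_eq_range',
        bOuter_eq (a :: t) (b :: u) (t.length + 1) 0 (by simp), List.drop_zero]
      exact main_list (a :: t) b u
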